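-- pv_equiv track=rewrite | github.com/yamato080915/pycode | DiffViewer.py | _align_texts
-- ===== SOURCE A (Python) =====
-- def _align_texts(text1_lines, text2_lines, opcodes):
-- 	"""テキストを整列し、各行のタイプ（追加/削除/変更/等しい）を返す"""
-- 	leftlines = []
-- 	rightlines = []
-- 	lefttypes = []
-- 	righttypes = []
--
-- 	for tag, i1, i2, j1, j2 in opcodes:
-- 		if tag == 'equal':
-- 			for i in range(i1, i2):
-- 				leftlines.append(text1_lines[i])
-- 				rightlines.append(text2_lines[j1 + i - i1])
-- 				lefttypes.append('equal')
-- 				righttypes.append('equal')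
-- 		elif tag == 'delete':
-- 			for i in range(i1, i2):
-- 				leftlines.append(text1_lines[i])
-- 				rightlines.append('')
-- 				lefttypes.append('delete')
-- 				righttypes.append('empty')
-- 		elif tag == 'insert':
-- 			for j in range(j1, j2):
-- 				leftlines.append('')
-- 				rightlines.append(text2_lines[j])
-- 				lefttypes.append('empty')
-- 				righttypes.append('insert')
-- 		elif tag == 'replace':
-- 			left_count = i2 - i1
-- 			right_count = j2 - j1
-- 			max_count = max(left_count, right_count)
--
-- 			for k in range(max_count):
-- 				if k < left_count:
-- 					leftlines.append(text1_lines[i1 + k])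
-- 					lefttypes.append('replace')
-- 				else:
-- 					leftlines.append('')
-- 					lefttypes.append('empty')
--
-- 				if k < right_count:
-- 					rightlines.append(text2_lines[j1 + k])
-- 					righttypes.append('replace')
-- 				else:
-- 					rightlines.append('')
-- 					righttypes.append('empty')
--
-- 	return leftlines, rightlines, lefttypes, righttypes
-- ===== SOURCE B (Python) =====
-- def _align_texts(text1_lines, text2_lines, opcodes):
-- 	"""Row-coordinate scheme: enumerate global (opcode, row) cells once, then
-- 	derive each of the four output columns as an independent map over the cells
-- 	with total cell functions (no padding, no branch-specific loops)."""
--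
-- 	def rows(op):
-- 		tag, i1, i2, j1, j2 = op
-- 		if tag == 'equal' or tag == 'delete':
-- 			return i2 - i1
-- 		if tag == 'insert':
-- 			return j2 - j1
-- 		if tag == 'replace':
-- 			return max(i2 - i1, j2 - j1)
-- 		return 0
--
-- 	def left_cell(op, k):
-- 		tag, i1, i2, j1, j2 = op
-- 		if tag == 'insert' or (tag == 'replace' and i2 - i1 <= k):
-- 			return ('', 'empty')
-- 		return (text1_lines[i1 + k], tag)
--
-- 	def right_cell(op, k):
-- 		tag, i1, i2, j1, j2 = op
-- 		if tag == 'delete' or (tag == 'replace' and j2 - j1 <= k):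
-- 			return ('', 'empty')
-- 		return (text2_lines[j1 + k], tag)
--
-- 	cells = [(op, k) for op in opcodes for k in range(rows(op))]
-- 	return ([left_cell(op, k)[0] for op, k in cells],
-- 		[right_cell(op, k)[0] for op, k in cells],
-- 		[left_cell(op, k)[1] for op, k in cells],
-- 		[right_cell(op, k)[1] for op, k in cells])
-- ===== Notes on version B (the rewrite author's own statement) =====
-- stated objective: alternative
-- what changed: Replaces A's single pass with four branch-specific quadruple-append loops by a row-coordinate scheme: first enumerate the flat list of (opcode, row) cells, then compute each of the four output columns as an independent map over that list using total left/right cell functions (no padding, no per-branch inner loops).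
import Mathlib
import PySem

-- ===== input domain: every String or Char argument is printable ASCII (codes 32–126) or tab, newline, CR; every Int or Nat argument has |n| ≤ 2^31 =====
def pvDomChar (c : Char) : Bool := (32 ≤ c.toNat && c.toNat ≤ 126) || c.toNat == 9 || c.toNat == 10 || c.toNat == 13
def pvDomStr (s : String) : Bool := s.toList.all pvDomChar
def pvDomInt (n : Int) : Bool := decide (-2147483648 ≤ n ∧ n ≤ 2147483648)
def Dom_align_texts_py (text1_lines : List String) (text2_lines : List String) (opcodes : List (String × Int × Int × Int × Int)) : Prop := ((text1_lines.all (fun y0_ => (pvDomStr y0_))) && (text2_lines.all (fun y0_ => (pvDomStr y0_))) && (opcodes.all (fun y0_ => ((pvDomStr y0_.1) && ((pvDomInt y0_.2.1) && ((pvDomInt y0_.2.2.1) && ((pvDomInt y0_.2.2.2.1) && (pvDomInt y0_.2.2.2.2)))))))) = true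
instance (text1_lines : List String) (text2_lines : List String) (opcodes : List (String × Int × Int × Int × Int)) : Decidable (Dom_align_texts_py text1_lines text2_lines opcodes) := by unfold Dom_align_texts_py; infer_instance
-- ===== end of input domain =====

-- B replaces A's four branch-specific quadruple-append loops by a row-coordinate scheme:
-- enumerate all (opcode, row) cells once, then derive each output column as an independent
-- map with total cell functions; objective: alternative decomposition. Return value only.

-- ===== PORT A =====
-- literal transliteration of A: one fold over opcodes, four accumulator lists, branch-specific inner loops
def alignStepA (text1_lines text2_lines : List String)
    (st : List String × List String × List String × List String)
    (op : String × Int × Int × Int × Int) :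
    List String × List String × List String × List String :=
  match op with
  | (tag, i1, i2, j1, j2) =>
    if tag == "equal" then
      (PySem.List.pyRange i1 i2 1).foldl (fun st i =>
        (st.1 ++ [PySem.List.pyGetD text1_lines i ""],
         st.2.1 ++ [PySem.List.pyGetD text2_lines (j1 + i - i1) ""],
         st.2.2.1 ++ ["equal"], st.2.2.2 ++ ["equal"])) st
    else if tag == "delete" then
      (PySem.List.pyRange i1 i2 1).foldl (fun st i =>
        (st.1 ++ [PySem.List.pyGetD text1_lines i ""],
         st.2.1 ++ [""],
         st.2.2.1 ++ ["delete"], st.2.2.2 ++ ["empty"])) st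
    else if tag == "insert" then
      (PySem.List.pyRange j1 j2 1).foldl (fun st j =>
        (st.1 ++ [""],
         st.2.1 ++ [PySem.List.pyGetD text2_lines j ""],
         st.2.2.1 ++ ["empty"], st.2.2.2 ++ ["insert"])) st
    else if tag == "replace" then
      let left_count := i2 - i1
      let right_count := j2 - j1
      let max_count := max left_count right_count
      (PySem.List.pyRange 0 max_count 1).foldl (fun st k =>
        let (ll, lt) :=
          if k < left_count then (st.1 ++ [PySem.List.pyGetD text1_lines (i1 + k) ""], st.2.2.1 ++ ["replace"])
          else (st.1 ++ [""], st.2.2.1 ++ ["empty"])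
        let (rl, rt) :=
          if k < right_count then (st.2.1 ++ [PySem.List.pyGetD text2_lines (j1 + k) ""], st.2.2.2 ++ ["replace"])
          else (st.2.1 ++ [""], st.2.2.2 ++ ["empty"])
        (ll, rl, lt, rt)) st
    else st

def align_texts_py (text1_lines : List String) (text2_lines : List String) (opcodes : List (String × Int × Int × Int × Int)) : List String × List String × List String × List String :=
  opcodes.foldl (alignStepA text1_lines text2_lines) ([], [], [], [])

-- ===== PORT B =====
-- transliteration of Source B: number of rows an opcode occupies
def pvRowsB (op : String × Int × Int × Int × Int) : Int :=
  match op with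
  | (tag, i1, i2, j1, j2) =>
    if tag = "equal" ∨ tag = "delete" then i2 - i1
    else if tag = "insert" then j2 - j1
    else if tag = "replace" then max (i2 - i1) (j2 - j1)
    else 0

-- Source B's left_cell: the (line, type) cell of the left column at row k of opcode op
def pvLeftCell (text1_lines : List String) (op : String × Int × Int × Int × Int) (k : Int) : String × String :=
  match op with
  | (tag, i1, i2, _, _) =>
    if tag = "insert" ∨ (tag = "replace" ∧ i2 - i1 ≤ k) then ("", "empty")
    else (PySem.List.pyGetD text1_lines (i1 + k) "", tag)

-- Source B's right_cell
def pvRightCell (text2_lines : List String) (op : String × Int × Int × Int × Int) (k : Int) : String × String :=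
  match op with
  | (tag, _, _, j1, j2) =>
    if tag = "delete" ∨ (tag = "replace" ∧ j2 - j1 ≤ k) then ("", "empty")
    else (PySem.List.pyGetD text2_lines (j1 + k) "", tag)

def align_texts_py_alt (text1_lines : List String) (text2_lines : List String) (opcodes : List (String × Int × Int × Int × Int)) : List String × List String × List String × List String :=
  let cells := opcodes.flatMap (fun op => (PySem.List.pyRange 0 (pvRowsB op) 1).map (fun k => (op, k)))
  (cells.map (fun c => (pvLeftCell text1_lines c.1 c.2).1),
   cells.map (fun c => (pvRightCell text2_lines c.1 c.2).1),
   cells.map (fun c => (pvLeftCell text1_lines c.1 c.2).2),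
   cells.map (fun c => (pvRightCell text2_lines c.1 c.2).2))

-- ===== PRECONDITION & SPEC =====
-- Pre_ excludes exactly the inputs on which A raises IndexError: some opcode asks for a
-- line index outside Python's valid (wraparound-inclusive) range of its text list.
def Pre_align_texts_py (text1_lines : List String) (text2_lines : List String) (opcodes : List (String × Int × Int × Int × Int)) : Prop :=
  ∀ op ∈ opcodes,
    match op with
    | (tag, i1, i2, j1, j2) =>
      (tag = "equal" → i1 < i2 →
        PySem.Raise.InRange text1_lines.length i1 ∧ PySem.Raise.InRange text1_lines.length (i2 - 1) ∧
        PySem.Raise.InRange text2_lines.length j1 ∧ PySem.Raise.InRange text2_lines.length (j1 + (i2 - i1) - 1)) ∧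
      (tag = "delete" → i1 < i2 →
        PySem.Raise.InRange text1_lines.length i1 ∧ PySem.Raise.InRange text1_lines.length (i2 - 1)) ∧
      (tag = "insert" → j1 < j2 →
        PySem.Raise.InRange text2_lines.length j1 ∧ PySem.Raise.InRange text2_lines.length (j2 - 1)) ∧
      (tag = "replace" →
        (i1 < i2 → PySem.Raise.InRange text1_lines.length i1 ∧ PySem.Raise.InRange text1_lines.length (i2 - 1)) ∧
        (j1 < j2 → PySem.Raise.InRange text2_lines.length j1 ∧ PySem.Raise.InRange text2_lines.length (j2 - 1)))
instance (text1_lines : List String) (text2_lines : List String) (opcodes : List (String × Int × Int × Int × Int)) : Decidable (Pre_align_texts_py text1_lines text2_lines opcodes) := by unfold Pre_align_texts_py; infer_instance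

def pvWitness_align_texts_py : List String × List String × (List (String × Int × Int × Int × Int)) :=
  (["a", "b"], ["a", "c"], [("equal", 0, 1, 0, 1), ("replace", 1, 2, 1, 2)])

def Spec_align_texts_py (text1_lines : List String) (text2_lines : List String) (opcodes : List (String × Int × Int × Int × Int)) (out : List String × List String × List String × List String) : Prop := out = align_texts_py_alt text1_lines text2_lines opcodes
instance (text1_lines : List String) (text2_lines : List String) (opcodes : List (String × Int × Int × Int × Int)) (out : List String × List String × List String × List String) : Decidable (Spec_align_texts_py text1_lines text2_lines opcodes out) := by unfold Spec_align_texts_py; infer_instance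

-- ===== CLAIM (what is proved, stated in full; the proofs are below) =====
def Claim_equal_align_texts_py : Prop := ∀ (text1_lines : List String) (text2_lines : List String) (opcodes : List (String × Int × Int × Int × Int)), Dom_align_texts_py text1_lines text2_lines opcodes → Pre_align_texts_py text1_lines text2_lines opcodes → Spec_align_texts_py text1_lines text2_lines opcodes (align_texts_py text1_lines text2_lines opcodes)

-- ===== LEMMAS AND PROOFS =====

-- a fold appending one element to each of the four accumulators is four maps
theorem foldl_append4 {α : Type} (ks : List α) (f g p q : α → String)
    (a b c d : List String) :
    ks.foldl (fun (st : List String × List String × List String × List String) k =>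
        (st.1 ++ [f k], st.2.1 ++ [g k], st.2.2.1 ++ [p k], st.2.2.2 ++ [q k])) (a, b, c, d)
      = (a ++ ks.map f, b ++ ks.map g, c ++ ks.map p, d ++ ks.map q) := by
  induction ks generalizing a b c d with
  | nil => simp
  | cons k ks ih => simp [List.foldl_cons, ih]

-- re-indexing a map over range a..b-1 as a map over range 0..(b-a)-1
theorem map_pyRange_shift {β : Type} (f : Int → β) (a b : Int) :
    (PySem.List.pyRange a b 1).map f
      = (PySem.List.pyRange 0 (b - a) 1).map (fun k => f (a + k)) := by
  rw [PySem.List.pyRange_one a b, PySem.List.pyRange_one 0 (b - a)]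
  simp [List.map_map, Function.comp_def]

-- each step of A appends exactly B's per-opcode cell columns
theorem stepA_eq_cells (t1 t2 : List String) (st : List String × List String × List String × List String)
    (op : String × Int × Int × Int × Int) :
    alignStepA t1 t2 st op =
      (st.1 ++ (PySem.List.pyRange 0 (pvRowsB op) 1).map (fun k => (pvLeftCell t1 op k).1),
       st.2.1 ++ (PySem.List.pyRange 0 (pvRowsB op) 1).map (fun k => (pvRightCell t2 op k).1),
       st.2.2.1 ++ (PySem.List.pyRange 0 (pvRowsB op) 1).map (fun k => (pvLeftCell t1 op k).2),
       st.2.2.2 ++ (PySem.List.pyRange 0 (pvRowsB op) 1).map (fun k => (pvRightCell t2 op k).2)) := by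
  obtain ⟨tag, i1, i2, j1, j2⟩ := op
  obtain ⟨a, b, c, d⟩ := st
  by_cases he : tag = "equal"
  · subst he
    simp only [alignStepA, pvRowsB, pvLeftCell, pvRightCell, beq_iff_eq, String.reduceEq,
      reduceIte, false_and, or_self, or_false]
    rw [foldl_append4 _ (fun i => PySem.List.pyGetD t1 i "")
        (fun i => PySem.List.pyGetD t2 (j1 + i - i1) "") (fun _ => "equal") (fun _ => "equal")]
    rw [map_pyRange_shift (fun i => PySem.List.pyGetD t1 i "") i1 i2,
        map_pyRange_shift (fun i => PySem.List.pyGetD t2 (j1 + i - i1) "") i1 i2]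
    rw [map_pyRange_shift (fun _ => ("equal" : String)) i1 i2]
    simp only [show ∀ k : Int, j1 + (i1 + k) - i1 = j1 + k from fun k => by ring]
  by_cases hd : tag = "delete"
  · subst hd
    simp only [alignStepA, pvRowsB, pvLeftCell, pvRightCell, beq_iff_eq, String.reduceEq,
      reduceIte, false_and, or_self, or_false, or_true]
    rw [foldl_append4 _ (fun i => PySem.List.pyGetD t1 i "")
        (fun _ => "") (fun _ => "delete") (fun _ => "empty")]
    rw [map_pyRange_shift (fun i => PySem.List.pyGetD t1 i "") i1 i2,
        map_pyRange_shift (fun _ => ("" : String)) i1 i2,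
        map_pyRange_shift (fun _ => ("delete" : String)) i1 i2,
        map_pyRange_shift (fun _ => ("empty" : String)) i1 i2]
  by_cases hi : tag = "insert"
  · subst hi
    simp only [alignStepA, pvRowsB, pvLeftCell, pvRightCell, beq_iff_eq, String.reduceEq,
      reduceIte, false_and, or_self, or_false]
    rw [foldl_append4 _ (fun _ => "")
        (fun j => PySem.List.pyGetD t2 j "") (fun _ => "empty") (fun _ => "insert")]
    rw [map_pyRange_shift (fun _ => ("" : String)) j1 j2,
        map_pyRange_shift (fun j => PySem.List.pyGetD t2 j "") j1 j2,
        map_pyRange_shift (fun _ => ("empty" : String)) j1 j2,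
        map_pyRange_shift (fun _ => ("insert" : String)) j1 j2]
  by_cases hr : tag = "replace"
  · subst hr
    simp only [alignStepA, pvRowsB, pvLeftCell, pvRightCell, beq_iff_eq, String.reduceEq,
      reduceIte, or_self, false_or, true_and]
    -- reduce A's conditional-pair body to the componentwise shape, then foldl_append4
    have hbody : (fun (st : List String × List String × List String × List String) (k : Int) =>
        let (ll, lt) :=
          if k < i2 - i1 then (st.1 ++ [PySem.List.pyGetD t1 (i1 + k) ""], st.2.2.1 ++ ["replace"])
          else (st.1 ++ [""], st.2.2.1 ++ ["empty"])
        let (rl, rt) :=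
          if k < j2 - j1 then (st.2.1 ++ [PySem.List.pyGetD t2 (j1 + k) ""], st.2.2.2 ++ ["replace"])
          else (st.2.1 ++ [""], st.2.2.2 ++ ["empty"])
        (ll, rl, lt, rt))
      = (fun (st : List String × List String × List String × List String) (k : Int) =>
        (st.1 ++ [if k < i2 - i1 then PySem.List.pyGetD t1 (i1 + k) "" else ""],
         st.2.1 ++ [if k < j2 - j1 then PySem.List.pyGetD t2 (j1 + k) "" else ""],
         st.2.2.1 ++ [if k < i2 - i1 then "replace" else "empty"],
         st.2.2.2 ++ [if k < j2 - j1 then "replace" else "empty"])) := by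
      funext st k
      split_ifs <;> rfl
    rw [hbody, foldl_append4 _
        (fun k => if k < i2 - i1 then PySem.List.pyGetD t1 (i1 + k) "" else "")
        (fun k => if k < j2 - j1 then PySem.List.pyGetD t2 (j1 + k) "" else "")
        (fun k => if k < i2 - i1 then "replace" else "empty")
        (fun k => if k < j2 - j1 then "replace" else "empty")]
    have hL : ∀ k : Int, (if k < i2 - i1 then PySem.List.pyGetD t1 (i1 + k) "" else "")
        = (if i2 - i1 ≤ k then (("", "empty") : String × String)
            else (PySem.List.pyGetD t1 (i1 + k) "", "replace")).1 := by
      intro k; split_ifs with h1 h2 <;> first | rfl | omega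
    have hR : ∀ k : Int, (if k < j2 - j1 then PySem.List.pyGetD t2 (j1 + k) "" else "")
        = (if j2 - j1 ≤ k then (("", "empty") : String × String)
            else (PySem.List.pyGetD t2 (j1 + k) "", "replace")).1 := by
      intro k; split_ifs with h1 h2 <;> first | rfl | omega
    have hLt : ∀ k : Int, (if k < i2 - i1 then "replace" else "empty")
        = (if i2 - i1 ≤ k then (("", "empty") : String × String)
            else (PySem.List.pyGetD t1 (i1 + k) "", "replace")).2 := by
      intro k; split_ifs with h1 h2 <;> first | rfl | omega
    have hRt : ∀ k : Int, (if k < j2 - j1 then "replace" else "empty")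
        = (if j2 - j1 ≤ k then (("", "empty") : String × String)
            else (PySem.List.pyGetD t2 (j1 + k) "", "replace")).2 := by
      intro k; split_ifs with h1 h2 <;> first | rfl | omega
    simp only [hL, hR, hLt, hRt]
  · simp [alignStepA, pvRowsB, pvLeftCell, pvRightCell, he, hd, hi, hr,
      PySem.List.pyRange_one_eq_nil (le_refl (0 : Int))]

theorem foldl_stepA (t1 t2 : List String) (ops : List (String × Int × Int × Int × Int))
    (a b c d : List String) :
    ops.foldl (alignStepA t1 t2) (a, b, c, d)
      = (a ++ ops.flatMap (fun op => (PySem.List.pyRange 0 (pvRowsB op) 1).map (fun k => (pvLeftCell t1 op k).1)),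
         b ++ ops.flatMap (fun op => (PySem.List.pyRange 0 (pvRowsB op) 1).map (fun k => (pvRightCell t2 op k).1)),
         c ++ ops.flatMap (fun op => (PySem.List.pyRange 0 (pvRowsB op) 1).map (fun k => (pvLeftCell t1 op k).2)),
         d ++ ops.flatMap (fun op => (PySem.List.pyRange 0 (pvRowsB op) 1).map (fun k => (pvRightCell t2 op k).2))) := by
  induction ops generalizing a b c d with
  | nil => simp
  | cons op ops ih =>
    simp only [List.foldl_cons, stepA_eq_cells, ih, List.flatMap_cons, List.append_assoc]

-- ===== VERDICT (by name: the statement is the Claim_ definition above) =====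
theorem align_texts_py_spec : Claim_equal_align_texts_py := by
  intro t1 t2 ops _ _
  unfold Spec_align_texts_py align_texts_py align_texts_py_alt
  rw [foldl_stepA]
  simp [List.map_flatMap, List.map_map, Function.comp_def]
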